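-- pv_equiv track=rewrite | github.com/the-tale/deworld | deworld/utils.py | shift2d
-- ===== SOURCE A (Python) =====
-- def copy2d(original):
--     data = [None] * len(original)
--     for i, row in enumerate(original):
--         data[i] = row[:]
--     return data
--
-- def shift2d(array, dx, dy):
--
--     result = copy2d(array)
--
--     for x in range(dx):
--         for row in result:
--             row.insert(0, row.pop())
--
--     for y in range(dy):
--         result.insert(0, result.pop())
--
--     return result
-- ===== SOURCE B (Python) =====
-- def shift2d(array, dx, dy):
--     def rot(xs, d):
--         # one-pass rotation right by d (d <= 0 means no shift, like range(d))
--         if d <= 0 or not xs: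
--             return list(xs)
--         n = len(xs) - d % len(xs)
--         return xs[n:] + xs[:n]
--     return rot([rot(row, dx) for row in array], dy)
-- ===== Notes on version B (the rewrite author's own statement) =====
-- stated objective: faster
-- what changed: Replaces A's dx nested one-step row rotations and dy one-step outer rotations with a single modular slice rotation (d % len) per row and once for the row list.
import Mathlib
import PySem

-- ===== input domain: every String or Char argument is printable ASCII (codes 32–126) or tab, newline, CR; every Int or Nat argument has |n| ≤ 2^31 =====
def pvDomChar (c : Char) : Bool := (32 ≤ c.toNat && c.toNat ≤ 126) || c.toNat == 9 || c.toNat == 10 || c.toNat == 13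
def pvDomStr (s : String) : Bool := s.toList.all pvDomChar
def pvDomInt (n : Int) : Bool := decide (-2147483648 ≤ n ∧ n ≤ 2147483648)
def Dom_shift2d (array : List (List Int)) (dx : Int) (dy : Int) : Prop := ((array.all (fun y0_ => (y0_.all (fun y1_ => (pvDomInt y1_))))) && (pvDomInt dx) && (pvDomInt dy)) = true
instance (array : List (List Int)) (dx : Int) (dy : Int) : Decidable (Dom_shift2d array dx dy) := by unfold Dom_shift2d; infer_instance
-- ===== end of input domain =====

-- B replaces A's dx/dy repeated one-step rotations by one modular slice rotation per axis (faster, asymptotic).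

-- ===== PORT A =====
-- copy2d: fresh list of row copies (row[:] = full slice)
def pvCopy2d (original : List (List Int)) : List (List Int) :=
  original.map (fun row => PySem.List.slice row none none)

-- one step of "row.insert(0, row.pop())": pop the last element, put it first.
-- On [] Python's pop raises IndexError ([] here is unreachable inside Pre_).
def pvRotOnce {α : Type} (xs : List α) : List α :=
  match xs.getLast? with
  | none => []
  | some l => l :: xs.dropLast

def shift2d (array : List (List Int)) (dx : Int) (dy : Int) : List (List Int) :=
  let result := pvCopy2d array
  let result := (PySem.List.pyRange 0 dx 1).foldl (fun r _ => r.map (fun row => pvRotOnce row)) result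
  (PySem.List.pyRange 0 dy 1).foldl (fun r _ => pvRotOnce r) result

-- ===== PORT B =====
-- rot(xs, d): one-pass right rotation by d (d <= 0 or empty: plain copy)
def pvRotB {α : Type} (xs : List α) (d : Int) : List α :=
  if d ≤ 0 ∨ xs.isEmpty then xs
  else
    let n : Int := (xs.length : Int) - PySem.Int.mod d (xs.length : Int)
    PySem.List.slice xs (some n) none ++ PySem.List.slice xs none (some n)

def shift2d_alt (array : List (List Int)) (dx : Int) (dy : Int) : List (List Int) :=
  pvRotB (array.map (fun row => pvRotB row dx)) dy

-- ===== PRECONDITION & SPEC =====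
-- Pre_ excludes exactly the inputs where A raises IndexError (pop from an empty list):
-- dx > 0 with some empty row, or dy > 0 with an empty array.
def Pre_shift2d (array : List (List Int)) (dx : Int) (dy : Int) : Prop :=
  (0 < dx → ∀ row ∈ array, row ≠ []) ∧ (0 < dy → array ≠ [])
instance (array : List (List Int)) (dx : Int) (dy : Int) : Decidable (Pre_shift2d array dx dy) := by unfold Pre_shift2d; infer_instance

def pvWitness_shift2d : List (List Int) × Int × Int := ([[1, 2, 3], [4, 5, 6]], 1, 1)

def Spec_shift2d (array : List (List Int)) (dx : Int) (dy : Int) (out : List (List Int)) : Prop := out = shift2d_alt array dx dy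
instance (array : List (List Int)) (dx : Int) (dy : Int) (out : List (List Int)) : Decidable (Spec_shift2d array dx dy out) := by unfold Spec_shift2d; infer_instance

-- ===== CLAIM (what is proved, stated in full; the proofs are below) =====
def Claim_equal_shift2d : Prop := ∀ (array : List (List Int)) (dx : Int) (dy : Int), Dom_shift2d array dx dy → Pre_shift2d array dx dy → Spec_shift2d array dx dy (shift2d array dx dy)
-- ===== LEMMAS AND PROOFS =====

-- a foldl that ignores the list's elements is an iterate
theorem pv_foldl_const {β : Type} (f : β → β) : ∀ (l : List Int) (init : β),
    l.foldl (fun r _ => f r) init = f^[l.length] init := by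
  intro l
  induction l with
  | nil => intro init; rfl
  | cons a t ih =>
      intro init
      simp [List.foldl_cons, ih, Function.iterate_succ_apply]

-- one pop-and-prepend step is a rotation by length - 1
theorem pv_rotOnce_eq {α : Type} (xs : List α) (h : xs ≠ []) :
    pvRotOnce xs = xs.rotate (xs.length - 1) := by
  rw [List.rotate_eq_drop_append_take (by omega), List.drop_length_sub_one h,
      ← List.dropLast_eq_take]
  simp [pvRotOnce, List.getLast?_eq_some_getLast h]

theorem pv_iter_rotOnce {α : Type} : ∀ (m : Nat) (xs : List α), xs ≠ [] →
    pvRotOnce^[m] xs = xs.rotate (m * (xs.length - 1)) := by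
  intro m
  induction m with
  | zero => intro xs h; simp
  | succ k ih =>
      intro xs h
      rw [Function.iterate_succ_apply', ih xs h]
      have hne : xs.rotate (k * (xs.length - 1)) ≠ [] := by
        intro hc
        have := congrArg List.length hc
        simp at this
        exact h this
      rw [pv_rotOnce_eq _ hne, List.length_rotate, List.rotate_rotate]
      ring_nf

-- the mod arithmetic: m*(L-1) and L - m%L agree modulo L
theorem pv_mod_arith (m L : Nat) (hL : 0 < L) :
    (m * (L - 1)) % L = (L - m % L) % L := by
  have hml : m % L ≤ L := le_of_lt (Nat.mod_lt m hL)
  have hInt : ((m * (L - 1) : Nat) : Int) % (L : Int) = ((L - m % L : Nat) : Int) % (L : Int) := by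
    have h1 : ((m * (L - 1) : Nat) : Int) = (m : Int) * (L : Int) - (m : Int) := by
      push_cast [Nat.one_le_iff_ne_zero.mpr (Nat.pos_iff_ne_zero.mp hL)]
      ring
    have h2 : ((L - m % L : Nat) : Int) = (L : Int) - ((m : Int) % (L : Int)) := by
      push_cast [hml]
      ring
    rw [h1, h2, Int.sub_emod ((m : Int) * (L : Int)) (m : Int),
        Int.sub_emod (L : Int) ((m : Int) % (L : Int))]
    simp [Int.mul_emod_left, Int.emod_emod_of_dvd]
  exact_mod_cast hInt

-- per-axis equivalence: dx repeated one-step rotations = one modular slice rotation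
theorem pv_rot_eq {α : Type} (xs : List α) (d : Int) (h : 0 < d → xs ≠ []) :
    pvRotOnce^[d.toNat] xs = pvRotB xs d := by
  by_cases hd : d ≤ 0
  · have : d.toNat = 0 := Int.toNat_of_nonpos hd
    simp [this, pvRotB, hd]
  · push Not at hd
    have hne := h hd
    have hL : 0 < xs.length := List.length_pos_iff.mpr hne
    set L := xs.length with hLdef
    set m := d.toNat with hm
    have hdm : d = (m : Int) := (Int.toNat_of_nonneg (le_of_lt hd)).symm
    have hmodc : PySem.Int.mod d (L : Int) = ((m % L : Nat) : Int) := by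
      rw [hdm]
      exact PySem.Int.mod_natCast m L
    have hEmpty : xs.isEmpty = false := by
      simp [hne]
    rw [pv_iter_rotOnce m xs hne]
    unfold pvRotB
    rw [if_neg (by simp [hEmpty]; omega)]
    simp only [hmodc, ← hLdef]
    have hml : m % L ≤ L := le_of_lt (Nat.mod_lt m hL)
    have hcast : (L : Int) - ((m % L : Nat) : Int) = ((L - m % L : Nat) : Int) := by
      push_cast [hml]; ring
    rw [hcast, PySem.List.slice_from_natCast, PySem.List.slice_to_natCast]
    rw [← List.rotate_eq_drop_append_take (by omega)]
    rw [← List.rotate_mod xs (m * (L - 1)), ← List.rotate_mod xs (L - m % L), ← hLdef,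
        pv_mod_arith m L hL]

-- iterating "map f" is mapping the iterate
theorem pv_iterate_map {α : Type} (f : List α → List α) :
    ∀ (n : Nat) (l : List (List α)), (fun r : List (List α) => r.map f)^[n] l = l.map f^[n] := by
  intro n
  induction n with
  | zero => intro l; simp
  | succ k ih =>
      intro l
      rw [Function.iterate_succ_apply, ih, List.map_map, ← Function.iterate_succ]

-- ===== VERDICT (by name: the statement is the Claim_ definition above) =====
theorem shift2d_spec : Claim_equal_shift2d := by
  intro array dx dy _ hpre
  unfold Spec_shift2d shift2d shift2d_alt
  obtain ⟨hrow, harr⟩ := hpre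
  have hcopy : pvCopy2d array = array := by
    simp [pvCopy2d, PySem.List.slice_none_none]
  rw [hcopy, pv_foldl_const, pv_foldl_const, PySem.List.length_pyRange_one,
      PySem.List.length_pyRange_one]
  simp only [Int.sub_zero]
  rw [pv_iterate_map]
  have hmap : array.map pvRotOnce^[dx.toNat] = array.map (fun row => pvRotB row dx) := by
    apply List.map_congr_left
    intro row hr
    exact pv_rot_eq row dx (fun hdx => hrow hdx row hr)
  rw [hmap]
  apply pv_rot_eq
  intro hdy
  simp [harr hdy]
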